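-- pv_equiv track=rewrite | github.com/anonymous121an/Multimodal-ters | src/utils/dataset_utils.py | _get_element_flags
-- ===== SOURCE A (Python) =====
-- def _get_element_flags(bonds: set) -> tuple:
--     """
--     Determine element presence based on the bonds.
--     Returns:
--         tuple: (contains_carbon, contains_hydrogen, contains_nitrogen, contains_oxygen)
--     """
--     contains_c = contains_h = contains_n = contains_o = False
--     for bond in bonds:
--         if bond == (6, 1):
--             contains_c = True
--             contains_h = True
--         elif bond == (6, 6):
--             contains_c = True
--         elif bond == (7, 1):
--             contains_n = True
--             contains_h = True
--         elif bond == (7, 6):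
--             contains_n = True
--             contains_c = True
--         elif bond == (7, 7):
--             contains_n = True
--         elif bond == (8, 1):
--             contains_o = True
--             contains_h = True
--         elif bond == (8, 6):
--             contains_o = True
--             contains_c = True
--         elif bond == (8, 7):
--             contains_o = True
--             contains_n = True
--         elif bond == (8, 8):
--             contains_o = True
--     return contains_c, contains_h, contains_n, contains_o
-- ===== SOURCE B (Python) =====
-- # Per-element bond tables: a flag is on iff bonds meets the element's table.
-- _C_BONDS = {(6, 1), (6, 6), (7, 6), (8, 6)}
-- _H_BONDS = {(6, 1), (7, 1), (8, 1)}
-- _N_BONDS = {(7, 1), (7, 6), (7, 7), (8, 7)}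
-- _O_BONDS = {(8, 1), (8, 6), (8, 7), (8, 8)}
--
--
-- def _get_element_flags(bonds: set) -> tuple:
--     """Each element is present iff the bond set intersects that element's
--     table of recognized bonds: four independent disjointness tests, no loop."""
--     b = set(bonds)
--     return (
--         not b.isdisjoint(_C_BONDS),
--         not b.isdisjoint(_H_BONDS),
--         not b.isdisjoint(_N_BONDS),
--         not b.isdisjoint(_O_BONDS),
--     )
-- ===== Notes on version B (the rewrite author's own statement) =====
-- stated objective: alternative
-- what changed: Replaces A's single pass with a 9-branch if/elif chain mutating four booleans by four independent set-disjointness tests of the input against one constant bond table per element (no explicit loop or branching over bonds).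
import Mathlib
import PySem

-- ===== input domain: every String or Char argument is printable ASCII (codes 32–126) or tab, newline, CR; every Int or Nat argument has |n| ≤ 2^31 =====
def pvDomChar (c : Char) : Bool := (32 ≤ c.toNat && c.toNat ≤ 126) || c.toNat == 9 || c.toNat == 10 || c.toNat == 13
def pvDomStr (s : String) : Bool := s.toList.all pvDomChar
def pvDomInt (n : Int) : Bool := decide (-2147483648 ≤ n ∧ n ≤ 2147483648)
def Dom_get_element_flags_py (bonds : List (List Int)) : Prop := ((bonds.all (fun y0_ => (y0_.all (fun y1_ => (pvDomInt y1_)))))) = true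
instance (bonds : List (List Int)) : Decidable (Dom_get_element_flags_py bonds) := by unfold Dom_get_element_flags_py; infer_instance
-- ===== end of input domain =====

-- B replaces A's 9-branch if/elif loop over four booleans by four independent
-- disjointness tests against constant per-element bond tables (objective: alternative).


-- ===== PORT A =====
-- A's loop body: the 9-way if/elif chain updating the four flags (c, h, n, o).
def pvStepA (st : Bool × Bool × Bool × Bool) (bond : List Int) : Bool × Bool × Bool × Bool :=
  if bond = [6, 1] then (true, true, st.2.2.1, st.2.2.2)
  else if bond = [6, 6] then (true, st.2.1, st.2.2.1, st.2.2.2)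
  else if bond = [7, 1] then (st.1, true, true, st.2.2.2)
  else if bond = [7, 6] then (true, st.2.1, true, st.2.2.2)
  else if bond = [7, 7] then (st.1, st.2.1, true, st.2.2.2)
  else if bond = [8, 1] then (st.1, true, st.2.2.1, true)
  else if bond = [8, 6] then (true, st.2.1, st.2.2.1, true)
  else if bond = [8, 7] then (st.1, st.2.1, true, true)
  else if bond = [8, 8] then (st.1, st.2.1, st.2.2.1, true)
  else st

def get_element_flags_py (bonds : List (List Int)) : List Bool :=
  let s := bonds.foldl pvStepA (false, false, false, false)
  [s.1, s.2.1, s.2.2.1, s.2.2.2]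

-- ===== PORT B =====
-- The four constant per-element bond tables of Source B.
def pvCBonds : PySem.Set (List Int) := PySem.Set.ofList [[6, 1], [6, 6], [7, 6], [8, 6]]
def pvHBonds : PySem.Set (List Int) := PySem.Set.ofList [[6, 1], [7, 1], [8, 1]]
def pvNBonds : PySem.Set (List Int) := PySem.Set.ofList [[7, 1], [7, 6], [7, 7], [8, 7]]
def pvOBonds : PySem.Set (List Int) := PySem.Set.ofList [[8, 1], [8, 6], [8, 7], [8, 8]]

def get_element_flags_py_alt (bonds : List (List Int)) : List Bool :=
  let b := PySem.Set.ofList bonds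
  [!(PySem.Set.isdisjoint b pvCBonds),
   !(PySem.Set.isdisjoint b pvHBonds),
   !(PySem.Set.isdisjoint b pvNBonds),
   !(PySem.Set.isdisjoint b pvOBonds)]

-- ===== PRECONDITION & SPEC =====
def Spec_get_element_flags_py (bonds : List (List Int)) (out : List Bool) : Prop := out = get_element_flags_py_alt bonds
instance (bonds : List (List Int)) (out : List Bool) : Decidable (Spec_get_element_flags_py bonds out) := by unfold Spec_get_element_flags_py; infer_instance

-- ===== CLAIM =====
def Claim_equal_get_element_flags_py : Prop := ∀ (bonds : List (List Int)), Dom_get_element_flags_py bonds → Spec_get_element_flags_py bonds (get_element_flags_py bonds)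

-- ===== LEMMAS AND PROOFS =====

-- A's fold computes, in each component, the initial flag OR-ed with "some bond hits that element's table".
lemma pv_foldA (l : List (List Int)) (c h n o : Bool) :
    l.foldl pvStepA (c, h, n, o) =
      (c || l.any (fun x => decide (x ∈ pvCBonds)),
       h || l.any (fun x => decide (x ∈ pvHBonds)),
       n || l.any (fun x => decide (x ∈ pvNBonds)),
       o || l.any (fun x => decide (x ∈ pvOBonds))) := by
  induction l generalizing c h n o with
  | nil => simp
  | cons b bs ih =>
    simp only [List.foldl_cons, List.any_cons]
    by_cases h1 : b = [6, 1]
    · subst h1; rw [pvStepA, ih]; simp [pvCBonds, pvHBonds, pvNBonds, pvOBonds]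
    by_cases h2 : b = [6, 6]
    · subst h2; rw [pvStepA, ih]; simp [pvCBonds, pvHBonds, pvNBonds, pvOBonds]
    by_cases h3 : b = [7, 1]
    · subst h3; rw [pvStepA, ih]; simp [pvCBonds, pvHBonds, pvNBonds, pvOBonds]
    by_cases h4 : b = [7, 6]
    · subst h4; rw [pvStepA, ih]; simp [pvCBonds, pvHBonds, pvNBonds, pvOBonds]
    by_cases h5 : b = [7, 7]
    · subst h5; rw [pvStepA, ih]; simp [pvCBonds, pvHBonds, pvNBonds, pvOBonds]
    by_cases h6 : b = [8, 1]
    · subst h6; rw [pvStepA, ih]; simp [pvCBonds, pvHBonds, pvNBonds, pvOBonds]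
    by_cases h7 : b = [8, 6]
    · subst h7; rw [pvStepA, ih]; simp [pvCBonds, pvHBonds, pvNBonds, pvOBonds]
    by_cases h8 : b = [8, 7]
    · subst h8; rw [pvStepA, ih]; simp [pvCBonds, pvHBonds, pvNBonds, pvOBonds]
    by_cases h9 : b = [8, 8]
    · subst h9; rw [pvStepA, ih]; simp [pvCBonds, pvHBonds, pvNBonds, pvOBonds]
    · rw [pvStepA]; simp only [h1, h2, h3, h4, h5, h6, h7, h8, h9, if_false]
      rw [ih]
      simp [pvCBonds, pvHBonds, pvNBonds, pvOBonds, h1, h2, h3, h4, h5, h6, h7, h8, h9]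

-- "not disjoint from a table" is exactly "some element of the original list is in the table".
lemma pv_not_isdisjoint (l t : List (List Int)) :
    (!(PySem.Set.isdisjoint (PySem.Set.ofList l) t)) = l.any (fun x => decide (x ∈ t)) := by
  by_cases hx : ∃ x ∈ l, x ∈ t
  · have h1 : PySem.Set.isdisjoint (PySem.Set.ofList l) t = false := by
      rcases hx with ⟨x, hxl, hxt⟩
      by_contra hc
      have hc' : PySem.Set.isdisjoint (PySem.Set.ofList l) t = true := by
        cases hh : PySem.Set.isdisjoint (PySem.Set.ofList l) t
        · exact absurd hh hc
        · rfl
      have := (PySem.Set.isdisjoint_iff _ _).mp hc'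
      exact this x (by simp [PySem.Set.mem_ofList, hxl]) hxt
    rw [h1]
    rcases hx with ⟨x, hxl, hxt⟩
    simp only [Bool.not_false]
    exact (List.any_eq_true.mpr ⟨x, hxl, by simp [hxt]⟩).symm
  · have h1 : PySem.Set.isdisjoint (PySem.Set.ofList l) t = true := by
      apply (PySem.Set.isdisjoint_iff _ _).mpr
      intro x hxl hxt
      exact hx ⟨x, by simpa [PySem.Set.mem_ofList] using hxl, hxt⟩
    rw [h1]
    simp only [Bool.not_true]
    symm
    simp only [List.any_eq_false]
    intro x hxl
    simp only [decide_eq_true_eq]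
    exact fun hxt => hx ⟨x, hxl, hxt⟩

-- ===== VERDICT =====
theorem get_element_flags_py_spec : Claim_equal_get_element_flags_py := by
  intro bonds _
  unfold Spec_get_element_flags_py get_element_flags_py get_element_flags_py_alt
  rw [pv_foldA]
  simp [pv_not_isdisjoint]
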